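-- pv_equiv track=rewrite | github.com/goldenmean/python | word_circle.py | is_word_circle
-- ===== SOURCE A (Python) =====
-- def is_word_circle(words):
--     startword = dict()
--     endword = dict()
--
--     for w in words:
--         start = w[0]
--         end = w[-1]
--
--         startword[start] = startword.get(start, 0) + 1
--         endword[end] = endword.get(end, 0) + 1
--
--     for k, v in startword.items():
--         if k not in endword or v != endword[k]:
--             return False
--     return True
-- ===== SOURCE B (Python) =====
-- def is_word_circle(words):
--     start = sorted(w[0] for w in words)
--     end = sorted(w[-1] for w in words)
--     return start == end
-- ===== Notes on version B (the rewrite author's own statement) =====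
-- stated objective: simpler
-- what changed: Replaces the two hand-built counting dictionaries and the key-by-key count comparison with sorting the lists of first and last letters and comparing them for multiset equality.
import Mathlib
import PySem

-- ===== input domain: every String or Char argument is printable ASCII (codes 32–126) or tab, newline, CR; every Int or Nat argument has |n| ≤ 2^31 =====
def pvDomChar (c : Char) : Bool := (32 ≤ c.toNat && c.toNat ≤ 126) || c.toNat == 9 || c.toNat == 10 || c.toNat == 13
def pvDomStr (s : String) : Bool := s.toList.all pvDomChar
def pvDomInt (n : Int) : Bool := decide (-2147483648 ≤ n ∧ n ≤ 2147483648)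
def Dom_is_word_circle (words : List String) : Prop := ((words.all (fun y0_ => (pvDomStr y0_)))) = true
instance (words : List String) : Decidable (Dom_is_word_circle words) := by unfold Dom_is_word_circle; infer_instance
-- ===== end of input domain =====

-- B replaces A's two counting dictionaries and key-by-key comparison with a sort-and-compare
-- multiset-equality test on the first and last letters (objective: simpler).

-- ===== PORT A =====
-- w[0] / w[-1]: Python raises IndexError on an empty word; Pre_ excludes those inputs, so the
-- `.getD ' '` default is never reached under Pre_.
def pvFirst (w : String) : Char := (PySem.Str.pyGet? w 0).getD ' '
def pvLast (w : String) : Char := (PySem.Str.pyGet? w (-1)).getD ' '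

-- the second loop of A: early `return False` becomes returning false from the recursion
def pvCheckItems (endword : PySem.Dict Char Int) : List (Char × Int) → Bool
  | [] => true
  | (k, v) :: rest =>
      if !(endword.contains k) || v != endword.getD k 0 then false
      else pvCheckItems endword rest

def is_word_circle (words : List String) : Bool :=
  let p := words.foldl
    (fun (p : PySem.Dict Char Int × PySem.Dict Char Int) w =>
      let start := pvFirst w
      let «end» := pvLast w
      (p.1.insert start (p.1.getD start 0 + 1), p.2.insert «end» (p.2.getD «end» 0 + 1)))
    (PySem.Dict.empty, PySem.Dict.empty)
  pvCheckItems p.2 p.1.items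

-- ===== PORT B =====
def is_word_circle_alt (words : List String) : Bool :=
  let start := PySem.List.sorted (words.map (fun w => pvFirst w)) (fun x => x) false
  let «end» := PySem.List.sorted (words.map (fun w => pvLast w)) (fun x => x) false
  start == «end»

-- ===== PRECONDITION & SPEC =====
-- Pre_ excludes lists containing an empty string, on which Python A (w[0]) raises IndexError.
def Pre_is_word_circle (words : List String) : Prop := ∀ w ∈ words, w ≠ ""
instance (words : List String) : Decidable (Pre_is_word_circle words) := by unfold Pre_is_word_circle; infer_instance
def pvWitness_is_word_circle : List String := ["ab", "ba"]

def Spec_is_word_circle (words : List String) (out : Bool) : Prop := out = is_word_circle_alt words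
instance (words : List String) (out : Bool) : Decidable (Spec_is_word_circle words out) := by unfold Spec_is_word_circle; infer_instance

-- ===== CLAIM (what is proved, stated in full; the proofs are below) =====
def Claim_equal_is_word_circle : Prop := ∀ (words : List String), Dom_is_word_circle words → Pre_is_word_circle words → Spec_is_word_circle words (is_word_circle words)

-- ===== LEMMAS AND PROOFS =====

-- A's single loop building the two dicts equals two separate counting folds
theorem pv_foldl_pair (words : List String) (a b : PySem.Dict Char Int) :
    words.foldl
      (fun (p : PySem.Dict Char Int × PySem.Dict Char Int) w =>
        let start := pvFirst w
        let «end» := pvLast w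
        (p.1.insert start (p.1.getD start 0 + 1), p.2.insert «end» (p.2.getD «end» 0 + 1)))
      (a, b)
    = ((words.map pvFirst).foldl (fun d c => d.insert c (d.getD c 0 + 1)) a,
       (words.map pvLast).foldl (fun d c => d.insert c (d.getD c 0 + 1)) b) := by
  induction words generalizing a b with
  | nil => simp
  | cons w ws ih => simp [ih]

-- the early-return loop is an `all`
theorem pv_checkItems_eq_all (d : PySem.Dict Char Int) (l : List (Char × Int)) :
    pvCheckItems d l = l.all (fun kv => d.contains kv.1 && kv.2 == d.getD kv.1 0) := by
  induction l with
  | nil => rfl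
  | cons kv rest ih =>
      obtain ⟨k, v⟩ := kv
      by_cases h1 : d.contains k = true <;> by_cases h2 : v = d.getD k 0 <;>
        simp [pvCheckItems, h1, h2, ih]

-- counts agreeing on s, plus equal lengths, is exactly multiset equality
theorem pv_count_iff_perm (s e : List Char) (hlen : s.length = e.length) :
    (∀ k ∈ s, s.count k = e.count k) ↔ s.Perm e := by
  constructor
  · intro h
    have hle : (s : Multiset Char) ≤ (e : Multiset Char) := by
      rw [Multiset.le_iff_count]
      intro c
      by_cases hc : c ∈ s
      · simp [Multiset.coe_count, h c hc]
      · simp [Multiset.coe_count, List.count_eq_zero_of_not_mem hc]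
    have := Multiset.eq_of_le_of_card_le hle (by simp [hlen])
    exact Multiset.coe_eq_coe.mp this.symm |>.symm
  · intro h k _
    exact h.count_eq k

theorem is_word_circle_eq_alt (words : List String) :
    is_word_circle words = is_word_circle_alt words := by
  unfold is_word_circle is_word_circle_alt
  rw [pv_foldl_pair]
  simp only [PySem.Dict.foldl_insert_getD_add_one_eq_counter]
  set s := words.map pvFirst with hs
  set e := words.map pvLast with he
  have hlen : s.length = e.length := by simp [hs, he]
  rw [pv_checkItems_eq_all, PySem.Dict.items_counter]
  simp only [List.all_map, Function.comp_def]
  rw [Bool.eq_iff_iff]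
  simp only [List.all_eq_true, beq_iff_eq, PySem.List.sorted_id_eq_sorted_id_iff_perm,
    PySem.Set.mem_ofList, Bool.and_eq_true, PySem.Dict.contains_counter,
    PySem.Dict.getD_counter, List.contains_eq_mem, decide_eq_true_eq]
  rw [← pv_count_iff_perm s e hlen]
  constructor
  · intro h k hk
    exact_mod_cast (h k hk).2
  · intro h k hk
    refine ⟨?_, by exact_mod_cast h k hk⟩
    have hpos : 0 < s.count k := List.count_pos_iff.mpr hk
    rw [h k hk] at hpos
    exact List.count_pos_iff.mp hpos

-- ===== VERDICT (by name: the statement is the Claim_ definition above) =====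
theorem is_word_circle_spec : Claim_equal_is_word_circle := by
  intro words _ _
  exact is_word_circle_eq_alt words
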